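-- pv_equiv track=rewrite | github.com/mllm-ts/VisualTimeAnomaly | src/utils.py | vector_to_interval
-- ===== SOURCE A (Python) =====
-- def vector_to_interval(vector):
--     intervals = []
--     in_interval = False
--     start = 0
--     for i, value in enumerate(vector):
--         if value == 1 and not in_interval:
--             start = i
--             in_interval = True
--         elif value == 0 and in_interval:
--             intervals.append((start, i))
--             in_interval = False
--     if in_interval:
--         intervals.append((start, len(vector)))
--
--     return intervals
-- ===== SOURCE B (Python) =====
-- def vector_to_interval(vector):
--     # Pass 1: mask of "inside an interval" at each position; == 1 / == 0
--     # comparisons exactly as in the original (other values carry the state).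
--     state = []
--     flag = False
--     for value in vector:
--         if value == 1:
--             flag = True
--         elif value == 0:
--             flag = False
--         state.append(flag)
--     # Pass 2: extract maximal runs of True from the mask.
--     intervals = []
--     start = None
--     for i, b in enumerate(state):
--         if b:
--             if start is None:
--                 start = i
--         elif start is not None:
--             intervals.append((start, i))
--             start = None
--     if start is not None:
--         intervals.append((start, len(vector)))
--     return intervals
-- ===== Notes on version B (the rewrite author's own statement) =====
-- stated objective: alternative
-- what changed: Replaces the single stateful scan (in_interval flag + start carried through one loop) by two passes: first materialise a boolean mask of 'inside an interval' per position, then extract maximal True-runs from the mask.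
import Mathlib
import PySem

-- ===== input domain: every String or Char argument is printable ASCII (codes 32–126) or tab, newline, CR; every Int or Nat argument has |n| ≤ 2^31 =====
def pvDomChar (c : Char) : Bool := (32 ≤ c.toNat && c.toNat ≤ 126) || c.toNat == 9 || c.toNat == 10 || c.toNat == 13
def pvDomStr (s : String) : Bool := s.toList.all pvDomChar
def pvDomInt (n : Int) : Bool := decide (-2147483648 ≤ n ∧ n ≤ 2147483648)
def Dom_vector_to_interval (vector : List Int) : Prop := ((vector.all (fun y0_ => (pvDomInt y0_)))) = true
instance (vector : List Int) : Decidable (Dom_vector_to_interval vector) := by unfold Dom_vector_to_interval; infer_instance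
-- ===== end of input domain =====

-- B replaces A's single stateful scan by two passes (a boolean mask, then run extraction); alternative decomposition, same cost.

-- ===== PORT A =====
-- the for-loop of A: state (intervals, in_interval, start), intervals built in order (cons-style accumulation of appends)
def vtiLoop : List Int → Int → Bool → Int → List (Int × Int) × Bool × Int
  | [], _, f, s => ([], f, s)
  | v :: vs, i, f, s =>
    if v = 1 ∧ f = false then vtiLoop vs (i + 1) true i
    else if v = 0 ∧ f = true then
      let r := vtiLoop vs (i + 1) false s
      ((s, i) :: r.1, r.2)
    else vtiLoop vs (i + 1) f s

def vector_to_interval (vector : List Int) : List (Int × Int) :=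
  let r := vtiLoop vector 0 false 0
  if r.2.1 then r.1 ++ [(r.2.2, (vector.length : Int))] else r.1

-- ===== PORT B =====
-- pass 1 of B: the "inside an interval" mask
def vtiMask : List Int → Bool → List Bool
  | [], _ => []
  | v :: vs, f =>
    let f' := if v = 1 then true else if v = 0 then false else f
    f' :: vtiMask vs f'

-- pass 2 of B: extract maximal runs of True (start : Option Int is B's `start = None` carry)
def vtiRuns : List Bool → Int → Option Int → List (Int × Int) × Option Int
  | [], _, st => ([], st)
  | b :: bs, i, none =>
    if b then vtiRuns bs (i + 1) (some i) else vtiRuns bs (i + 1) none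
  | b :: bs, i, some s =>
    if b then vtiRuns bs (i + 1) (some s)
    else
      let r := vtiRuns bs (i + 1) none
      ((s, i) :: r.1, r.2)

def vector_to_interval_alt (vector : List Int) : List (Int × Int) :=
  let state := vtiMask vector false
  let r := vtiRuns state 0 none
  match r.2 with
  | some s => r.1 ++ [(s, (vector.length : Int))]
  | none => r.1

-- ===== PRECONDITION & SPEC =====
def Spec_vector_to_interval (vector : List Int) (out : List (Int × Int)) : Prop := out = vector_to_interval_alt vector
instance (vector : List Int) (out : List (Int × Int)) : Decidable (Spec_vector_to_interval vector out) := by unfold Spec_vector_to_interval; infer_instance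

-- ===== CLAIM (what is proved, stated in full; the proofs are below) =====
def Claim_equal_vector_to_interval : Prop := ∀ (vector : List Int), Dom_vector_to_interval vector → Spec_vector_to_interval vector (vector_to_interval vector)

-- ===== LEMMAS AND PROOFS =====

-- the two loops agree step by step: same interval list, and A's (flag,start) pair matches B's Option carry
theorem vti_key (vs : List Int) : ∀ (i : Int) (f : Bool) (s : Int),
    (vtiLoop vs i f s).1 = (vtiRuns (vtiMask vs f) i (if f then some s else none)).1 ∧
    ((vtiRuns (vtiMask vs f) i (if f then some s else none)).2 =
      (if (vtiLoop vs i f s).2.1 then some (vtiLoop vs i f s).2.2 else none)) := by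
  induction vs with
  | nil => intro i f s; cases f <;> simp [vtiLoop, vtiMask, vtiRuns]
  | cons v vs ih =>
    intro i f s
    by_cases h1 : v = 1
    · cases f <;> simp [vtiLoop, vtiMask, vtiRuns, h1] <;> exact ih (i+1) true _
    · by_cases h0 : v = 0
      · cases f
        · simp [vtiLoop, vtiMask, vtiRuns, h0]
          exact ih (i+1) false s
        · simp [vtiLoop, vtiMask, vtiRuns, h0]
          have := ih (i+1) false s
          simp at this
          exact ⟨this.1, this.2⟩
      · cases f <;> simp [vtiLoop, vtiMask, vtiRuns, h1, h0]
        · exact ih (i+1) false s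
        · exact ih (i+1) true s

-- ===== VERDICT (by name: the statement is the Claim_ definition above) =====
theorem vector_to_interval_spec : Claim_equal_vector_to_interval := by
  intro vector _
  unfold Spec_vector_to_interval vector_to_interval vector_to_interval_alt
  have h := vti_key vector 0 false 0
  simp only [if_neg Bool.false_ne_true] at h
  obtain ⟨h1, h2⟩ := h
  cases hf : (vtiLoop vector 0 false 0).2.1 <;>
    simp [hf] at h2 <;> simp [hf, h2, ← h1]
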